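-- pv_equiv track=rewrite | github.com/kelerer1/path_finding_on_a_2D_map | funcs.py | find_character_position
-- ===== SOURCE A (Python) =====
-- def find_character_position(map_data: list, char: str) -> tuple:
--     location = None
--     for key, x in enumerate(map_data):
--         try:
--             position = x.find(char)
--             if position > 0:
--                 location = (position, key)
--         except ValueError:
--             pass
--
--     return location
-- ===== SOURCE B (Python) =====
-- def find_character_position(map_data: list, char: str) -> tuple:
--     # Scan rows from last to first; the first hit (position > 0) is A's last hit.
--     for key in range(len(map_data) - 1, -1, -1):
--         position = map_data[key].find(char)
--         if position > 0:
--             return (position, key)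
--     return None
-- ===== Notes on version B (the rewrite author's own statement) =====
-- stated objective: alternative
-- what changed: B scans rows from last to first and returns at the first row whose find(char) position is > 0, instead of A's full forward accumulation with last-write-wins and a dead try/except.
import Mathlib
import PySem

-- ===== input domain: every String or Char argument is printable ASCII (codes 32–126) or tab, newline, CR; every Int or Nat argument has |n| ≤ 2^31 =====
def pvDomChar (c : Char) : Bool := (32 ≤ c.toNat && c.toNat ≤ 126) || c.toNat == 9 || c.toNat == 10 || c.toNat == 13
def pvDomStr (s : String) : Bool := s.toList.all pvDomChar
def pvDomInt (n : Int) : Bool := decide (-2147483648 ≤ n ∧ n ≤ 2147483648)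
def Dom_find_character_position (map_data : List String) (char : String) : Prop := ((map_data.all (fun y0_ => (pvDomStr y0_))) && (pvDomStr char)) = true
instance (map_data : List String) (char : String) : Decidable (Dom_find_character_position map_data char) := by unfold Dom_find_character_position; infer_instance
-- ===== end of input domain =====

-- B scans rows from last to first and returns at the first row with find(char) > 0 (A accumulates forward, last write wins); same result, different decomposition.

-- ===== PORT A =====
def find_character_position (map_data : List String) (char : String) : Option (Int × Int) :=
  (PySem.List.enumerate map_data 0).foldl
    (fun location kx =>
      let position := PySem.Str.find kx.2 char
      if position > 0 then some (position, kx.1) else location)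
    none

-- ===== PORT B =====
-- reversed index loop: k+1 stands for current key k, counting down
def find_character_position_alt_go (map_data : List String) (char : String) : Nat → Option (Int × Int)
  | 0 => none
  | k+1 =>
    let position := PySem.Str.find (map_data.getD k "") char
    if position > 0 then some (position, (k : Int))
    else find_character_position_alt_go map_data char k

def find_character_position_alt (map_data : List String) (char : String) : Option (Int × Int) :=
  find_character_position_alt_go map_data char map_data.length

-- ===== PRECONDITION & SPEC =====
def Spec_find_character_position (map_data : List String) (char : String) (out : Option (Int × Int)) : Prop := out = find_character_position_alt map_data char
instance (map_data : List String) (char : String) (out : Option (Int × Int)) : Decidable (Spec_find_character_position map_data char out) := by unfold Spec_find_character_position; infer_instance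

-- ===== CLAIM (what is proved, stated in full; the proofs are below) =====
def Claim_equal_find_character_position : Prop := ∀ (map_data : List String) (char : String), Dom_find_character_position map_data char → Spec_find_character_position map_data char (find_character_position map_data char)

-- ===== LEMMAS AND PROOFS =====

-- the go-loop only reads indices below its bound, so appending a row is invisible
theorem go_append (l : List String) (x : String) (char : String) (k : Nat) (hk : k ≤ l.length) :
    find_character_position_alt_go (l ++ [x]) char k = find_character_position_alt_go l char k := by
  induction k with
  | zero => rfl
  | succ k ih =>
    simp only [find_character_position_alt_go]
    rw [List.getD_append _ _ _ _ (by omega), ih (by omega)]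

theorem foldl_eq_go (l : List String) (char : String) :
    (PySem.List.enumerate l 0).foldl
      (fun location kx =>
        let position := PySem.Str.find kx.2 char
        if position > 0 then some (position, kx.1) else location)
      none = find_character_position_alt_go l char l.length := by
  induction l using List.reverseRecOn with
  | nil => rfl
  | append_singleton l x ih =>
    rw [PySem.List.enumerate_append, List.foldl_append, ih]
    simp only [PySem.List.enumerate, List.foldl, List.length_append, List.length_cons,
      List.length_nil, find_character_position_alt_go]
    rw [List.getD_append_right _ _ _ _ (le_refl _), go_append _ _ _ _ (le_refl _)]
    simp

-- ===== VERDICT (by name: the statement is the Claim_ definition above) =====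
theorem find_character_position_spec : Claim_equal_find_character_position := by
  intro map_data char _
  unfold Spec_find_character_position find_character_position find_character_position_alt
  exact foldl_eq_go map_data char
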